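-- pv_equiv track=rewrite | github.com/OxfordIonTrapGroup/ndscan | ndscan/plots/utils.py | hide_series_from_groups
-- ===== SOURCE A (Python) =====
-- def hide_series_from_groups(panes_axes_names: list[list[list[str]]],
--                             hidden_names: set[str]):
--     """To produce a stable layout and style (series placement and color), we iterate
--         once over all series and keep only those that are not hidden, skipping empty
--         axes and panes as we go, before actually creating the layout/plot items.
--
--     :param panes_axes_names: Names of series names for each axis in each pane,
--         as returned by :func:``group_axes_into_panes()``.
--     :param hidden_names: A set of names which are to be removed from the groups.
--         If a group is empty as a result, this group is removed.
--
--     :return: A list of lists of lists giving a tuple of channel name and the index in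
--         the original series for each axis and plot, after removing the hidden elements.
--     """
--     panes_axes_shown = []
--     for axes_names in panes_axes_names:
--         series_idx = 0
--         axes_shown = []
--         for names in axes_names:
--             series_shown = []
--             for name in names:
--                 if name not in hidden_names:
--                     series_shown.append((series_idx, name))
--                 series_idx += 1
--             if len(series_shown) > 0:
--                 axes_shown.append(series_shown)
--         if len(axes_shown) > 0:
--             panes_axes_shown.append(axes_shown)
--     return panes_axes_shown
-- ===== SOURCE B (Python) =====
-- from itertools import accumulate
--
--
-- def hide_series_from_groups(panes_axes_names, hidden_names):
--     result = []
--     for axes_names in panes_axes_names: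
--         offsets = list(accumulate((len(names) for names in axes_names), initial=0))
--         axes = [[(off + i, name) for i, name in enumerate(names)
--                  if name not in hidden_names]
--                 for off, names in zip(offsets, axes_names)]
--         axes = [axis for axis in axes if axis]
--         if axes:
--             result.append(axes)
--     return result
-- ===== Notes on version B (the rewrite author's own statement) =====
-- stated objective: alternative
-- what changed: Replaces the threaded mutable series_idx counter with a two-phase pass per pane: per-axis starting offsets precomputed as prefix sums of axis lengths (itertools.accumulate), then each axis built by an enumerate-based comprehension offset+i, with empty axes/panes pruned afterwards.
import Mathlib
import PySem

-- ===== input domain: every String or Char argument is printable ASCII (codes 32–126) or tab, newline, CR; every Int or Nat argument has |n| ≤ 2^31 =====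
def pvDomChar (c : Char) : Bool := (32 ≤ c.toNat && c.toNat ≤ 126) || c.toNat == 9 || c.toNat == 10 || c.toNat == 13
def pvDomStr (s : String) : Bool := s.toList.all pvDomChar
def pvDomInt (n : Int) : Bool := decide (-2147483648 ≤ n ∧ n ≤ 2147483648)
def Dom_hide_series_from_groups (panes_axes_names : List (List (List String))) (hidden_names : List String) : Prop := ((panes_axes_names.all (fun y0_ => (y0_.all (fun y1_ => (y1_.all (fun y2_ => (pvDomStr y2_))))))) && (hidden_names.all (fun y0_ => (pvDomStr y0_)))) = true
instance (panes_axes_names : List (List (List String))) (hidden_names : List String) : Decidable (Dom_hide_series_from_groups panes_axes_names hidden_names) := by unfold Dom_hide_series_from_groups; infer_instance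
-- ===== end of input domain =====

-- B replaces A's threaded mutable series_idx counter with per-pane prefix-sum offsets and an
-- enumerate-based comprehension per axis (objective: alternative decomposition, same cost).

-- ===== PORT A =====
def hide_series_from_groups (panes_axes_names : List (List (List String))) (hidden_names : List String) : List (List (List (Int × String))) :=
  panes_axes_names.foldl (fun panes_axes_shown axes_names =>
    let st := axes_names.foldl (fun (st : Int × List (List (Int × String))) names =>
      let inner := names.foldl (fun (acc : Int × List (Int × String)) name =>
          (acc.1 + 1, if hidden_names.contains name then acc.2 else acc.2 ++ [(acc.1, name)]))
        (st.1, [])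
      (inner.1, if inner.2.length > 0 then st.2 ++ [inner.2] else st.2)) ((0 : Int), [])
    if st.2.length > 0 then panes_axes_shown ++ [st.2] else panes_axes_shown) []

-- ===== PORT B =====
-- one axis: [(off + i, name) for i, name in enumerate(names) if name not in hidden_names]
def pvAltAxis (hidden_names : List String) (off : Int) (names : List String) : List (Int × String) :=
  (PySem.List.enumerate names).filterMap (fun p =>
    if hidden_names.contains p.2 then none else some (off + p.1, p.2))

def hide_series_from_groups_alt (panes_axes_names : List (List (List String))) (hidden_names : List String) : List (List (List (Int × String))) :=
  panes_axes_names.foldl (fun result axes_names =>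
    let offsets := (axes_names.map (fun names => (names.length : Int))).scanl (· + ·) 0
    let axes := (offsets.zip axes_names).map (fun p => pvAltAxis hidden_names p.1 p.2)
    let axes := axes.filter (fun a => !a.isEmpty)
    if axes.isEmpty then result else result ++ [axes]) []

-- ===== PRECONDITION & SPEC =====
def Spec_hide_series_from_groups (panes_axes_names : List (List (List String))) (hidden_names : List String) (out : List (List (List (Int × String)))) : Prop := out = hide_series_from_groups_alt panes_axes_names hidden_names
instance (panes_axes_names : List (List (List String))) (hidden_names : List String) (out : List (List (List (Int × String)))) : Decidable (Spec_hide_series_from_groups panes_axes_names hidden_names out) := by unfold Spec_hide_series_from_groups; infer_instance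

-- ===== CLAIM (what is proved, stated in full; the proofs are below) =====
def Claim_equal_hide_series_from_groups : Prop := ∀ (panes_axes_names : List (List (List String))) (hidden_names : List String), Dom_hide_series_from_groups panes_axes_names hidden_names → Spec_hide_series_from_groups panes_axes_names hidden_names (hide_series_from_groups panes_axes_names hidden_names)

-- ===== LEMMAS AND PROOFS =====

-- canonical per-pane recursion both ports are reduced to
def pvGoAxes (hidden_names : List String) (k : Int) : List (List String) → List (List (Int × String))
  | [] => []
  | names :: rest =>
    let a := pvAltAxis hidden_names k names
    let r := pvGoAxes hidden_names (k + names.length) rest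
    if a.isEmpty then r else a :: r

theorem pvGoAxes_nil (hidden_names : List String) (k : Int) :
    pvGoAxes hidden_names k [] = [] := rfl

theorem pvGoAxes_cons (hidden_names : List String) (k : Int) (names : List String)
    (rest : List (List String)) :
    pvGoAxes hidden_names k (names :: rest)
      = (if (pvAltAxis hidden_names k names).isEmpty then
          pvGoAxes hidden_names (k + names.length) rest
        else pvAltAxis hidden_names k names :: pvGoAxes hidden_names (k + names.length) rest) := rfl

theorem pvAltAxis_shift (hidden_names : List String) (t : List String) :
    ∀ (s : Int) (k : Int),
    (PySem.List.enumerate t s).filterMap (fun p =>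
        if hidden_names.contains p.2 then none else some (k + p.1, p.2))
      = pvAltAxis hidden_names (k + s) t := by
  induction t with
  | nil => intro s k; simp [pvAltAxis, PySem.List.enumerate_nil]
  | cons n t ih =>
    intro s k
    have h1 := ih (s + 1) k
    have h2 := ih 1 (k + s)
    rw [PySem.List.enumerate_cons, List.filterMap_cons]
    unfold pvAltAxis
    rw [PySem.List.enumerate_cons, List.filterMap_cons]
    by_cases hm : n ∈ hidden_names <;>
      simp [hm, List.contains_eq_mem, show k + (s + 1) = k + s + 1 by ring] at h1 h2 ⊢ <;>
      rw [h1, h2]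

theorem pvAltAxis_cons (hidden_names : List String) (k : Int) (n : String) (t : List String) :
    pvAltAxis hidden_names k (n :: t)
      = (if hidden_names.contains n then [] else [(k, n)]) ++ pvAltAxis hidden_names (k + 1) t := by
  have h2 := pvAltAxis_shift hidden_names t 1 k
  have h3 := pvAltAxis_shift hidden_names t 0 (k + 1)
  unfold pvAltAxis
  rw [PySem.List.enumerate_cons, List.filterMap_cons]
  by_cases hm : n ∈ hidden_names <;>
    simp [hm, List.contains_eq_mem] at h2 h3 ⊢ <;> rw [h2, h3]

theorem pvInner_eq (hidden_names : List String) (names : List String) :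
    ∀ (k : Int) (acc : List (Int × String)),
    names.foldl (fun (acc : Int × List (Int × String)) name =>
        (acc.1 + 1, if hidden_names.contains name then acc.2 else acc.2 ++ [(acc.1, name)])) (k, acc)
      = (k + names.length, acc ++ pvAltAxis hidden_names k names) := by
  induction names with
  | nil => intro k acc; simp [pvAltAxis, PySem.List.enumerate_nil]
  | cons n t ih =>
    intro k acc
    rw [List.foldl_cons, ih, pvAltAxis_cons]
    by_cases hm : n ∈ hidden_names <;>
      simp [hm, List.contains_eq_mem] <;> ring

theorem pvAxesA_eq (hidden_names : List String) (axes_names : List (List String)) :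
    ∀ (k : Int) (acc : List (List (Int × String))),
    axes_names.foldl (fun (st : Int × List (List (Int × String))) names =>
        let inner := names.foldl (fun (acc : Int × List (Int × String)) name =>
            (acc.1 + 1, if hidden_names.contains name then acc.2 else acc.2 ++ [(acc.1, name)]))
          (st.1, [])
        (inner.1, if inner.2.length > 0 then st.2 ++ [inner.2] else st.2)) (k, acc)
      = (k + (axes_names.map (fun names => (names.length : Int))).sum,
         acc ++ pvGoAxes hidden_names k axes_names) := by
  induction axes_names with
  | nil => intro k acc; simp [pvGoAxes_nil]
  | cons names rest ih =>
    intro k acc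
    rw [List.foldl_cons]
    show List.foldl _ ((fun (st : Int × List (List (Int × String))) names =>
        let inner := names.foldl (fun (acc : Int × List (Int × String)) name =>
            (acc.1 + 1, if hidden_names.contains name then acc.2 else acc.2 ++ [(acc.1, name)]))
          (st.1, [])
        (inner.1, if inner.2.length > 0 then st.2 ++ [inner.2] else st.2)) (k, acc) names) rest = _
    have hstep : (fun (st : Int × List (List (Int × String))) names =>
        let inner := names.foldl (fun (acc : Int × List (Int × String)) name =>
            (acc.1 + 1, if hidden_names.contains name then acc.2 else acc.2 ++ [(acc.1, name)]))
          (st.1, [])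
        (inner.1, if inner.2.length > 0 then st.2 ++ [inner.2] else st.2)) (k, acc) names
      = (k + names.length,
          if (pvAltAxis hidden_names k names).length > 0 then acc ++ [pvAltAxis hidden_names k names]
          else acc) := by
      simp only []
      rw [pvInner_eq hidden_names names k []]
      simp
    rw [hstep, ih, pvGoAxes_cons]
    by_cases h : (pvAltAxis hidden_names k names).isEmpty
    · have h0 : (pvAltAxis hidden_names k names).length = 0 := by
        simpa [List.isEmpty_iff] using h
      simp [h, h0]
      ring
    · have h0 : (pvAltAxis hidden_names k names).length > 0 := by
        rcases List.isEmpty_eq_false_iff_exists_mem.mp (by simpa using h) with ⟨x, hx⟩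
        exact List.length_pos_of_mem hx
      simp [h, h0]
      ring

theorem pvAxesB_eq (hidden_names : List String) (axes_names : List (List String)) :
    ∀ (k : Int),
    ((((axes_names.map (fun names => (names.length : Int))).scanl (· + ·) k).zip
        axes_names).map (fun p => pvAltAxis hidden_names p.1 p.2)).filter (fun a => !a.isEmpty)
      = pvGoAxes hidden_names k axes_names := by
  induction axes_names with
  | nil => intro k; simp [pvGoAxes_nil]
  | cons names rest ih =>
    intro k
    rw [List.map_cons, List.scanl_cons, List.zip_cons_cons, List.map_cons, List.filter_cons]
    rw [ih, pvGoAxes_cons]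
    by_cases h : (pvAltAxis hidden_names k names).isEmpty <;> simp [h]

theorem pvPanes_eq (hidden_names : List String) (panes : List (List (List String))) :
    ∀ (acc : List (List (List (Int × String)))),
    panes.foldl (fun panes_axes_shown axes_names =>
      let st := axes_names.foldl (fun (st : Int × List (List (Int × String))) names =>
        let inner := names.foldl (fun (acc : Int × List (Int × String)) name =>
            (acc.1 + 1, if hidden_names.contains name then acc.2 else acc.2 ++ [(acc.1, name)]))
          (st.1, [])
        (inner.1, if inner.2.length > 0 then st.2 ++ [inner.2] else st.2)) ((0 : Int), [])
      if st.2.length > 0 then panes_axes_shown ++ [st.2] else panes_axes_shown) acc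
    =
    panes.foldl (fun result axes_names =>
      let offsets := (axes_names.map (fun names => (names.length : Int))).scanl (· + ·) 0
      let axes := (offsets.zip axes_names).map (fun p => pvAltAxis hidden_names p.1 p.2)
      let axes := axes.filter (fun a => !a.isEmpty)
      if axes.isEmpty then result else result ++ [axes]) acc := by
  induction panes with
  | nil => intro acc; rfl
  | cons axes_names rest ih =>
    intro acc
    rw [List.foldl_cons, List.foldl_cons, ih]
    congr 1
    simp only [pvAxesA_eq hidden_names axes_names 0 ([] : List (List (Int × String))),
      pvAxesB_eq hidden_names axes_names 0]
    by_cases h : (pvGoAxes hidden_names 0 axes_names).isEmpty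
    · have h0 : (pvGoAxes hidden_names 0 axes_names).length = 0 := by
        simpa [List.isEmpty_iff] using h
      simp [h, h0]
    · have h0 : (pvGoAxes hidden_names 0 axes_names).length > 0 := by
        rcases List.isEmpty_eq_false_iff_exists_mem.mp (by simpa using h) with ⟨x, hx⟩
        exact List.length_pos_of_mem hx
      simp [h, h0]

-- ===== VERDICT (by name: the statement is the Claim_ definition above) =====
theorem hide_series_from_groups_spec : Claim_equal_hide_series_from_groups := by
  intro panes hidden _
  unfold Spec_hide_series_from_groups hide_series_from_groups hide_series_from_groups_alt
  exact pvPanes_eq hidden panes []
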